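-- pv_equiv track=rewrite | github.com/itskc0501/MCQ-Generator | Krishna Chaitanya N_nlp_assignment/script.py | form_quest
-- ===== SOURCE A (Python) =====
-- def form_quest(key_sent):
--     quest_ = []
--     for word1 in key_sent:
--         for word2 in key_sent:
--             if word1 != word2:
--                 w_1 = key_sent[word1]
--                 w_2 = key_sent[word2]
--                 for s_a in w_1:
--                     for s_b in w_2:
--                         if s_a == s_b:
--                             quest_.append((word1, word2, s_a))
--     return quest_
-- ===== SOURCE B (Python) =====
-- def form_quest(key_sent):
--     # Inverted index: sentence -> indices of the words containing it (with
--     # multiplicity).  For each word1 only the words that actually share a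
--     # sentence are visited (in key order), expanding each shared sentence by
--     # its multiplicity, instead of A's scan over all word pairs and sentences.
--     words = list(key_sent)
--     inv = {}
--     for i, w in enumerate(words):
--         for s in key_sent[w]:
--             inv.setdefault(s, []).append(i)
--     quest_ = []
--     for i, word1 in enumerate(words):
--         w_1 = key_sent[word1]
--         cand = set()
--         for s in w_1:
--             cand.update(inv.get(s, []))
--         cand.discard(i)
--         for j in sorted(cand):
--             word2 = words[j]
--             for s in w_1:
--                 quest_.extend([(word1, word2, s)] * inv[s].count(j))
--     return quest_
-- ===== Notes on version B (the rewrite author's own statement) =====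
-- stated objective: faster
-- what changed: B builds an inverted index from sentence to word indices once and, for each word1, visits only the words that share a sentence with it (candidate set, sorted back into key order), expanding each shared sentence by its multiplicity, instead of A's scan over all word pairs and all sentence pairs; intended as faster (skips non-sharing pairs); a timing run measured B 2-4x faster at the largest size both finished, unconfirmed beyond that.
import Mathlib
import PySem

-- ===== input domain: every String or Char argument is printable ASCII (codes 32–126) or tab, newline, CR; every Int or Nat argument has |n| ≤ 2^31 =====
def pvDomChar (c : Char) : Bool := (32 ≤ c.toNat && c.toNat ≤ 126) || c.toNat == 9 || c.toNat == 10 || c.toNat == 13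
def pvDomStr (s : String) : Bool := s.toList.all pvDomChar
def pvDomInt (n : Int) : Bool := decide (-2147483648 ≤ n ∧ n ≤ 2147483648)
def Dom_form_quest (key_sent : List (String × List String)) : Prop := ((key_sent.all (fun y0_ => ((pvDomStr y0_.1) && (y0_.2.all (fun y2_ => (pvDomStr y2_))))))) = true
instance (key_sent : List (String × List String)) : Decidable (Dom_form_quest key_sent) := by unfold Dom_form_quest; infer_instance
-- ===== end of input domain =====

-- B builds an inverted index sentence -> word indices once and visits, for each
-- word1, only the words sharing a sentence with it (in key order), instead of
-- A's scan over all word pairs and all sentence pairs (intended as faster;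
-- a timing run measured B 2-4x faster at the largest size both finished).

-- shared helper: `key_sent[w]` (dict lookup; the key is always present when called)
def pvVal (key_sent : List (String × List String)) (w : String) : List String :=
  ((PySem.Dict.mk key_sent).get? w).getD []

-- ===== PORT A =====
def form_quest (key_sent : List (String × List String)) : List (String × String × String) :=
  (key_sent.map Prod.fst).foldl (fun quest_ word1 =>
    (key_sent.map Prod.fst).foldl (fun quest_ word2 =>
      if word1 ≠ word2 then
        let w_1 := pvVal key_sent word1
        let w_2 := pvVal key_sent word2
        w_1.foldl (fun quest_ s_a =>
          w_2.foldl (fun quest_ s_b =>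
            if s_a == s_b then quest_ ++ [(word1, word2, s_a)] else quest_) quest_) quest_
      else quest_) quest_) []

-- ===== PORT B =====
def form_quest_alt (key_sent : List (String × List String)) : List (String × String × String) :=
  let words := key_sent.map Prod.fst
  let inv : PySem.Dict String (List Int) :=
    (PySem.List.enumerate words 0).foldl (fun d p =>
      (pvVal key_sent p.2).foldl (fun d s => d.modify s [] (· ++ [p.1])) d) PySem.Dict.empty
  (PySem.List.enumerate words 0).foldl (fun quest_ p =>
    let w_1 := pvVal key_sent p.2
    let cand : PySem.Set Int := w_1.foldl (fun c s => PySem.Set.update c (inv.getD s [])) PySem.Set.empty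
    let cand := PySem.Set.discard cand p.1
    (PySem.List.sorted cand (fun j => j) false).foldl (fun quest_ j =>
      let word2 := PySem.List.pyGetD words j ""     -- words[j]: j is always a valid index here
      w_1.foldl (fun quest_ s =>
        quest_ ++ List.replicate ((inv.getD s []).count j) (p.2, word2, s)) quest_) quest_) []

-- ===== PRECONDITION & SPEC =====
-- Pre_ excludes association lists with duplicate keys, which do not faithfully
-- represent a Python dict (dict construction keeps only the last value per key).
def Pre_form_quest (key_sent : List (String × List String)) : Prop :=
  (key_sent.map Prod.fst).Nodup
instance (key_sent : List (String × List String)) : Decidable (Pre_form_quest key_sent) := by unfold Pre_form_quest; infer_instance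

def pvWitness_form_quest : (List (String × List String)) :=
  [("cat", ["s1", "s2"]), ("dog", ["s2", "s2"]), ("fox", ["s3"])]

def Spec_form_quest (key_sent : List (String × List String)) (out : List (String × String × String)) : Prop := out = form_quest_alt key_sent
instance (key_sent : List (String × List String)) (out : List (String × String × String)) : Decidable (Spec_form_quest key_sent out) := by unfold Spec_form_quest; infer_instance

-- ===== CLAIM (what is proved, stated in full; the proofs are below) =====
def Claim_equal_form_quest : Prop := ∀ (key_sent : List (String × List String)), Dom_form_quest key_sent → Pre_form_quest key_sent → Spec_form_quest key_sent (form_quest key_sent)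

-- ===== LEMMAS AND PROOFS =====

-- A's innermost scan over w_2 appends `count` copies
theorem pv_filter_map_const_eq_replicate {T : Type} (l : List String) (sa : String) (x : T) :
    (l.filter (fun s_b => sa == s_b)).map (fun _ => x) = List.replicate (l.count sa) x := by
  induction l with
  | nil => simp
  | cons b t ih =>
    by_cases h : sa = b
    · subst h; simp [List.replicate_succ', ih, ← List.replicate_succ]
    · simp [h, Ne.symm h, ih]

theorem pv_inner_scan_eq {T : Type} (l : List String) (sa : String) (x : T)
    (acc : List T) :
    l.foldl (fun a s_b => if sa == s_b then a ++ [x] else a) acc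
      = acc ++ List.replicate (l.count sa) x := by
  rw [PySem.List.foldl_append_if (p := fun s_b => sa == s_b) (f := fun _ => x),
    pv_filter_map_const_eq_replicate]

-- the inverted-index fold, characterised: inv[s] = indices with multiplicity
theorem pv_inv_getD (ks : List (String × List String)) (E : List (Int × String))
    (d : PySem.Dict String (List Int)) (s : String) :
    ((E.foldl (fun d p => (pvVal ks p.2).foldl (fun d s' => d.modify s' [] (· ++ [p.1])) d) d).getD s [])
      = d.getD s [] ++ E.flatMap (fun p => List.replicate ((pvVal ks p.2).count s) p.1) := by
  induction E generalizing d with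
  | nil => simp
  | cons p t ih =>
    rw [List.foldl_cons, ih]
    have h1 : (pvVal ks p.2).foldl (fun d s' => d.modify s' [] (· ++ [p.1])) d
        = ((pvVal ks p.2).map (fun s' => (s', p.1))).foldl (fun d q => d.modify q.1 [] (· ++ [q.2])) d := by
      rw [List.foldl_map]
    rw [h1, List.flatMap_cons, ← List.append_assoc]
    congr 1
    rw [PySem.Dict.getD_foldl_modify_append]
    congr 1
    have h2 : ((pvVal ks p.2).map (fun s' => (s', p.1))).filter (fun q => q.1 == s)
        = ((pvVal ks p.2).filter (fun s' => s' == s)).map (fun s' => (s', p.1)) := by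
      rw [List.filter_map]; rfl
    rw [h2, List.map_map]
    have h3 : ((pvVal ks p.2).filter (fun s' => s' == s)).map ((fun q => q.2) ∘ (fun s' => (s', p.1)))
        = ((pvVal ks p.2).filter (fun s' => s == s')).map (fun _ => p.1) := by
      have : ∀ (m : List String), m.filter (fun s' => s' == s) = m.filter (fun s' => s == s') := by
        intro m; apply List.filter_congr; intro x _; simp [eq_comm]
      rw [this]; rfl
    rw [h3, pv_filter_map_const_eq_replicate]

-- counting an index in the inverted list, when the fsts are pairwise distinct
theorem pv_count_flatMap_replicate (E : List (Int × String)) (g : String → Nat) (j : Int)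
    (hE : E.Pairwise (fun p q => p.1 ≠ q.1)) (p : Int × String) (hp : p ∈ E) (hj : p.1 = j) :
    (E.flatMap (fun q => List.replicate (g q.2) q.1)).count j = g p.2 := by
  induction E with
  | nil => simp at hp
  | cons q t ih =>
    rw [List.flatMap_cons, List.count_append]
    rcases List.mem_cons.mp hp with h | h
    · subst h
      have hz : (t.flatMap (fun q => List.replicate (g q.2) q.1)).count j = 0 := by
        rw [List.count_eq_zero]
        intro hmem
        rcases List.mem_flatMap.mp hmem with ⟨r, hr, hjr⟩
        have := (List.mem_replicate.mp hjr).2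
        exact ((List.pairwise_cons.mp hE).1 r hr) (by rw [hj, ← this])
      rw [hz, hj, List.count_replicate_self]; omega
    · have hne : q.1 ≠ j := by
        rw [← hj]; exact (List.pairwise_cons.mp hE).1 p h
      have hz : (List.replicate (g q.2) q.1).count j = 0 := by
        rw [List.count_eq_zero]
        intro hmem
        exact hne (List.mem_replicate.mp hmem).2.symm
      rw [hz, ih (List.pairwise_cons.mp hE).2 h]
      omega

theorem pv_mem_flatMap_replicate (E : List (Int × String)) (g : String → Nat) (j : Int) :
    j ∈ E.flatMap (fun q => List.replicate (g q.2) q.1) ↔ ∃ q ∈ E, q.1 = j ∧ 0 < g q.2 := by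
  constructor
  · intro h
    rcases List.mem_flatMap.mp h with ⟨q, hq, hjq⟩
    have := List.mem_replicate.mp hjq
    exact ⟨q, hq, this.2.symm, Nat.pos_of_ne_zero this.1⟩
  · rintro ⟨q, hq, rfl, hpos⟩
    exact List.mem_flatMap.mpr ⟨q, hq, List.mem_replicate.mpr ⟨Nat.pos_iff_ne_zero.mp hpos, rfl⟩⟩

-- a fold whose steps all fix the accumulator is the identity
theorem pv_foldl_id {α β : Type} (l : List α) (f : β → α → β) (acc : β)
    (h : ∀ a x, x ∈ l → f a x = a) : l.foldl f acc = acc := by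
  induction l generalizing acc with
  | nil => rfl
  | cons x t ih =>
    rw [List.foldl_cons, h acc x (List.mem_cons_self ..)]
    exact ih _ (fun a y hy => h a y (List.mem_cons_of_mem _ hy))

-- dropping identity steps: fold over l = fold over the filtered l
theorem pv_foldl_filter_identity {α β : Type} (l : List α) (p : α → Bool) (f : β → α → β) (acc : β)
    (h : ∀ a x, x ∈ l → p x = false → f a x = a) :
    l.foldl f acc = (l.filter p).foldl f acc := by
  induction l generalizing acc with
  | nil => rfl
  | cons x t ih =>
    by_cases hx : p x
    · rw [List.filter_cons_of_pos hx, List.foldl_cons, List.foldl_cons]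
      exact ih _ (fun a y hy hp => h a y (List.mem_cons_of_mem _ hy) hp)
    · rw [List.filter_cons_of_neg hx, List.foldl_cons,
        h acc x (List.mem_cons_self ..) (Bool.not_eq_true _ ▸ (by simpa using hx))]
      exact ih _ (fun a y hy hp => h a y (List.mem_cons_of_mem _ hy) hp)


-- membership in a fold of Set.update
theorem pv_mem_foldl_update (w1 : List String) (g : String → List Int) (c : PySem.Set Int) (j : Int) :
    j ∈ w1.foldl (fun c s => PySem.Set.update c (g s)) c ↔ j ∈ c ∨ ∃ s ∈ w1, j ∈ g s := by
  induction w1 generalizing c with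
  | nil => simp
  | cons s t ih =>
    rw [List.foldl_cons, ih]
    simp [PySem.Set.mem_update]
    tauto

theorem pv_nodup_foldl_update (w1 : List String) (g : String → List Int) (c : PySem.Set Int)
    (hc : c.Nodup) : (w1.foldl (fun c s => PySem.Set.update c (g s)) c).Nodup := by
  induction w1 generalizing c with
  | nil => exact hc
  | cons s t ih =>
    rw [List.foldl_cons]
    exact ih _ (PySem.Set.nodup_update _ _ hc)

-- ===== VERDICT (by name: the statement is the Claim_ definition above) =====
theorem form_quest_spec : Claim_equal_form_quest := by
  intro ks _ hnd
  unfold Spec_form_quest form_quest form_quest_alt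
  simp only []
  have hfold : ∀ {β : Type} (f : β → String → β) (a : β),
      (ks.map Prod.fst).foldl f a
        = (PySem.List.enumerate (ks.map Prod.fst) 0).foldl (fun b p => f b p.2) a := by
    intro β f a
    conv_lhs => rw [← PySem.List.map_snd_enumerate (xs := ks.map Prod.fst) (s := 0)]
    rw [List.foldl_map]
  -- abbreviations
  have hEp : (PySem.List.enumerate (ks.map Prod.fst) 0).Pairwise (fun p q => p.1 ≠ q.1) :=
    (PySem.List.pairwise_lt_enumerate _ _).imp (fun h => ne_of_lt h)
  have hmemE : ∀ p ∈ PySem.List.enumerate (ks.map Prod.fst) 0,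
      PySem.List.pyGetD (ks.map Prod.fst) p.1 "" = p.2 := by
    intro p hp
    rcases (PySem.List.mem_enumerate_iff _ _ _).mp hp with ⟨k, hk, rfl⟩
    have hk' : k < ks.length := by simpa using hk
    simp [PySem.List.pyGetD_natCast, List.getD_eq_getElem?_getD, List.getElem?_eq_getElem hk']
  have hinj : ∀ p ∈ PySem.List.enumerate (ks.map Prod.fst) 0,
      ∀ q ∈ PySem.List.enumerate (ks.map Prod.fst) 0, p.1 = q.1 → p = q := by
    intro p hp q hq h1
    rcases (PySem.List.mem_enumerate_iff _ _ _).mp hp with ⟨k, hk, rfl⟩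
    rcases (PySem.List.mem_enumerate_iff _ _ _).mp hq with ⟨k', hk', rfl⟩
    simp only [Prod.mk.injEq]
    simp only [zero_add] at h1 ⊢
    have : k = k' := by exact_mod_cast h1
    subst this
    exact ⟨rfl, rfl⟩
  have hsnd : ∀ p ∈ PySem.List.enumerate (ks.map Prod.fst) 0,
      ∀ q ∈ PySem.List.enumerate (ks.map Prod.fst) 0, p.2 = q.2 → p = q := by
    intro p hp q hq h2
    rcases (PySem.List.mem_enumerate_iff _ _ _).mp hp with ⟨k, hk, rfl⟩
    rcases (PySem.List.mem_enumerate_iff _ _ _).mp hq with ⟨k', hk', rfl⟩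
    simp only at h2
    have : k = k' := by
      exact List.Nodup.getElem_inj_iff hnd |>.mp h2
    subst this
    rfl
  have hinv : ∀ s : String,
      ((PySem.List.enumerate (ks.map Prod.fst) 0).foldl
          (fun d p => (pvVal ks p.2).foldl (fun d s' => d.modify s' [] (· ++ [p.1])) d)
          PySem.Dict.empty).getD s []
        = (PySem.List.enumerate (ks.map Prod.fst) 0).flatMap
            (fun p => List.replicate ((pvVal ks p.2).count s) p.1) := by
    intro s
    rw [pv_inv_getD]
    simp
  rw [hfold]
  apply PySem.List.foldl_congr_mem
  intro acc p1 hp1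
  rw [hfold]
  -- the predicate selecting the word2's B visits
  set pred : Int × String → Bool := fun p2 =>
    (decide (p2.1 ≠ p1.1)) && ((pvVal ks p1.2).any (fun s => (pvVal ks p2.2).count s != 0)) with hpreddef
  -- A: simplify the innermost scan, then drop the identity steps
  have hA : (PySem.List.enumerate (ks.map Prod.fst) 0).foldl
      (fun quest_ p2 =>
        if p1.2 ≠ p2.2 then
          (pvVal ks p1.2).foldl (fun quest_ s_a =>
            (pvVal ks p2.2).foldl (fun quest_ s_b =>
              if s_a == s_b then quest_ ++ [(p1.2, p2.2, s_a)] else quest_) quest_) quest_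
        else quest_) acc
      = ((PySem.List.enumerate (ks.map Prod.fst) 0).filter pred).foldl
        (fun quest_ p2 =>
          (pvVal ks p1.2).foldl (fun quest_ s =>
            quest_ ++ List.replicate ((pvVal ks p2.2).count s) (p1.2, p2.2, s)) quest_) acc := by
    have h1 : (PySem.List.enumerate (ks.map Prod.fst) 0).foldl
        (fun quest_ p2 =>
          if p1.2 ≠ p2.2 then
            (pvVal ks p1.2).foldl (fun quest_ s_a =>
              (pvVal ks p2.2).foldl (fun quest_ s_b =>
                if s_a == s_b then quest_ ++ [(p1.2, p2.2, s_a)] else quest_) quest_) quest_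
          else quest_) acc
        = (PySem.List.enumerate (ks.map Prod.fst) 0).foldl
          (fun quest_ p2 =>
            if p1.2 ≠ p2.2 then
              (pvVal ks p1.2).foldl (fun quest_ s =>
                quest_ ++ List.replicate ((pvVal ks p2.2).count s) (p1.2, p2.2, s)) quest_
            else quest_) acc := by
      apply PySem.List.foldl_congr_mem
      intro q p2 _
      by_cases hg : p1.2 ≠ p2.2
      · rw [if_pos hg, if_pos hg]
        apply PySem.List.foldl_congr_mem
        intro a sa _
        exact pv_inner_scan_eq _ _ _ _
      · rw [if_neg hg, if_neg hg]
    rw [h1]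
    rw [pv_foldl_filter_identity _ pred]
    · apply PySem.List.foldl_congr_mem
      intro q p2 hp2
      rcases List.mem_filter.mp hp2 with ⟨hp2E, hpred⟩
      have hne1 : p2.1 ≠ p1.1 := by
        rw [hpreddef] at hpred
        simpa using (Bool.and_eq_true_iff.mp hpred).1
      have hg : p1.2 ≠ p2.2 := by
        intro h
        exact hne1 (congrArg Prod.fst (hsnd p2 hp2E p1 hp1 h.symm)) |>.elim
      rw [if_pos hg]
    · intro q p2 hp2E hpred
      rw [hpreddef] at hpred
      by_cases h : p2.1 = p1.1
      · have : p2 = p1 := hinj p2 hp2E p1 hp1 h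
        subst this
        simp
      · have hany : (pvVal ks p1.2).any (fun s => (pvVal ks p2.2).count s != 0) = false := by
          rcases Bool.and_eq_false_iff.mp hpred with h' | h'
          · exact absurd h (by simpa using h')
          · exact h'
        rw [List.any_eq_false] at hany
        by_cases hg : p1.2 ≠ p2.2
        · rw [if_pos hg]
          apply pv_foldl_id
          intro a s hs
          have : (pvVal ks p2.2).count s = 0 := by
            have := hany s hs
            simpa using this
          rw [this]
          simp
        · rw [if_neg hg]
  rw [hA]
  -- B: the sorted candidate list is exactly the filtered enumerate's indices
  have hS : PySem.List.sorted
      (PySem.Set.discard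
        ((pvVal ks p1.2).foldl (fun c s => PySem.Set.update c
          (((PySem.List.enumerate (ks.map Prod.fst) 0).foldl
              (fun d p => (pvVal ks p.2).foldl (fun d s' => d.modify s' [] (· ++ [p.1])) d)
              PySem.Dict.empty).getD s [])) PySem.Set.empty) p1.1)
      (fun j => j) false
      = ((PySem.List.enumerate (ks.map Prod.fst) 0).filter pred).map (fun p2 => p2.1) := by
    have hpair : (((PySem.List.enumerate (ks.map Prod.fst) 0).filter pred).map (fun p2 => p2.1)).Pairwise
        (fun a b => (fun j => j) a < (fun j => j) b) := by
      rw [List.pairwise_map]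
      exact ((PySem.List.pairwise_lt_enumerate _ _).filter pred)
    have hysnd : (((PySem.List.enumerate (ks.map Prod.fst) 0).filter pred).map (fun p2 => p2.1)).Nodup :=
      hpair.imp (fun h => ne_of_lt h)
    have hdn : (PySem.Set.discard
        ((pvVal ks p1.2).foldl (fun c s => PySem.Set.update c
          (((PySem.List.enumerate (ks.map Prod.fst) 0).foldl
              (fun d p => (pvVal ks p.2).foldl (fun d s' => d.modify s' [] (· ++ [p.1])) d)
              PySem.Dict.empty).getD s [])) PySem.Set.empty) p1.1).Nodup :=
      PySem.Set.nodup_discard _ _ (pv_nodup_foldl_update _ _ _ List.nodup_nil)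
    refine PySem.List.sorted_eq_of_perm_of_pairwise_lt _ _ _ ?_ hpair
    rw [List.perm_ext_iff_of_nodup hysnd hdn]
    intro j
    constructor
    · intro hj
      rcases List.mem_map.mp hj with ⟨p2, hp2, rfl⟩
      rcases List.mem_filter.mp hp2 with ⟨hp2E, hpred⟩
      rw [hpreddef] at hpred
      rcases Bool.and_eq_true_iff.mp hpred with ⟨hne, hany⟩
      rcases List.any_eq_true.mp hany with ⟨s, hs, hc⟩
      rw [PySem.Set.mem_discard]
      refine ⟨?_, by simpa using hne⟩
      rw [pv_mem_foldl_update]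
      refine Or.inr ⟨s, hs, ?_⟩
      rw [hinv s]
      exact (pv_mem_flatMap_replicate _ (fun w => (pvVal ks w).count s) _).mpr
        ⟨p2, hp2E, rfl, by simpa [Nat.pos_iff_ne_zero] using hc⟩
    · intro hj
      rw [PySem.Set.mem_discard] at hj
      rcases hj with ⟨hj, hne⟩
      rw [pv_mem_foldl_update] at hj
      rcases hj with h | ⟨s, hs, hj⟩
      · simp [PySem.Set.empty] at h
      · rw [hinv s] at hj
        rcases (pv_mem_flatMap_replicate _ (fun w => (pvVal ks w).count s) _).mp hj with ⟨q, hqE, rfl, hpos⟩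
        refine List.mem_map.mpr ⟨q, List.mem_filter.mpr ⟨hqE, ?_⟩, rfl⟩
        rw [hpreddef]
        refine Bool.and_eq_true_iff.mpr ⟨by simpa using hne, ?_⟩
        exact List.any_eq_true.mpr ⟨s, hs, by simpa [Nat.pos_iff_ne_zero] using hpos⟩
  rw [hS, List.foldl_map]
  -- pointwise agreement on the filtered list
  apply Eq.symm
  apply PySem.List.foldl_congr_mem
  intro a p2 hp2
  have hp2E : p2 ∈ PySem.List.enumerate (ks.map Prod.fst) 0 := (List.mem_filter.mp hp2).1
  have hword2 : PySem.List.pyGetD (ks.map Prod.fst) p2.1 "" = p2.2 := hmemE p2 hp2E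
  rw [hword2]
  apply PySem.List.foldl_congr_mem
  intro a2 s _
  have hcnt : (((PySem.List.enumerate (ks.map Prod.fst) 0).foldl
      (fun d p => (pvVal ks p.2).foldl (fun d s' => d.modify s' [] (· ++ [p.1])) d)
      PySem.Dict.empty).getD s []).count p2.1 = (pvVal ks p2.2).count s := by
    rw [hinv s]
    exact pv_count_flatMap_replicate _ (fun w => List.count s (pvVal ks w)) _ hEp p2 hp2E rfl
  rw [hcnt]
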